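-- pv_equiv track=rewrite | github.com/Tomoki-YAMASHITA/CrySPY | src/cryspy/RS/rs_gen.py | _divide_task
-- ===== SOURCE A (Python) =====
-- def _divide_task(ntask, size, offset=0):
--     '''
--     # ---------- args
--     ntask: int, total number of tasks
--     size: int, number of processes
--     offset: int, offset of task number
--
--     # ---------- return
--     ntask_list: list, number of tasks for each process
--     offset_list: list, offset of task number for each process
--
--     # ---------- description
--     For example, ntask = 10, size = 4,
--     we would like to divide the task as follows:
--         rank0 = [0, 1, 2] <-- 3
--         rank1 = [3, 4, 5] <-- 3
--         rank2 = [6, 7]    <-- 2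
--         rank3 = [8, 9]    <-- 2
--
--     ntask_list = [3, 3, 2, 2]
--     offset_list = [0, 3, 6, 8]
--
--     ntask = 4, size = 1, offset = 5
--         rank0 = [5, 6, 7, 8] <-- 4
--         ntask_list = [4]
--         offset_list = [5]
--
--     case: ntask = 20, size = 4, init_n = 10
--         rank0 = [10, 11, 12, 13, 14] <-- 5
--         rank1 = [15, 16, 17, 18, 19] <-- 5
--         rank2 = [20, 21, 22, 23, 24] <-- 5
--         rank3 = [25, 26, 27, 28, 29] <-- 5
--
--     ntask_list = [5, 5, 5, 5]
--     offset_list = [10, 15, 20, 25]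
--     '''
--     q = (ntask)//size
--     r = (ntask)%size
--     ntask_list = []
--     offset_list = []
--     for i in range(size):
--         offset_list.append(offset)
--         if r > 0:
--             ntask_list.append(q + 1)
--             offset += q + 1
--             r = r -1
--         else:
--             ntask_list.append(q)
--             offset += q
--     return ntask_list, offset_list
-- ===== SOURCE B (Python) =====
-- def _divide_task(ntask, size, offset=0):
--     q = ntask // size
--     r = ntask % size
--     ntask_list = [q + 1 if i < r else q for i in range(size)]
--     offset_list = [offset + i * q + min(i, r) for i in range(size)]
--     return ntask_list, offset_list
-- ===== Notes on version B (the rewrite author's own statement) =====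
-- stated objective: simpler
-- what changed: Replaces the loop's mutable running offset and r-countdown with closed-form per-index formulas: ntask_list[i] = q+1 if i<r else q and offset_list[i] = offset + i*q + min(i, r), built as two comprehensions.
import Mathlib
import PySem

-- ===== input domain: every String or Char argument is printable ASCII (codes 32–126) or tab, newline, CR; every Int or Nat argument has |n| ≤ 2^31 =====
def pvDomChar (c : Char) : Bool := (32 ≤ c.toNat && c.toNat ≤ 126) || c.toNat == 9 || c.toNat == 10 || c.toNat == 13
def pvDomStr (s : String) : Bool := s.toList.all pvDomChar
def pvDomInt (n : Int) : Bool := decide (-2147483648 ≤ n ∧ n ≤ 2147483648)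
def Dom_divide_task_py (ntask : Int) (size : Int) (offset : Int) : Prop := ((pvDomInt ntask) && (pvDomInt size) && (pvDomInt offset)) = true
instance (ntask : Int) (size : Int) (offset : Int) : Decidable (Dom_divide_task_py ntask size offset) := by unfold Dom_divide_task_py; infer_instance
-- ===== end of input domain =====

-- B replaces A's running-offset accumulator and r-countdown by closed-form per-index
-- formulas (ntask_list[i] = q+1 if i<r else q; offset_list[i] = offset + i*q + min(i,r)):
-- objective 'simpler', same cost.

-- ===== PORT A =====
-- one iteration of A's for-loop body; state = (ntask_list, offset_list, offset, r)
def divideStepA (q : Int) (s : List Int × List Int × Int × Int) : List Int × List Int × Int × Int :=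
  let nl := s.1; let ol := s.2.1; let off := s.2.2.1; let r := s.2.2.2
  let ol' := ol ++ [off]
  if r > 0 then (nl ++ [q + 1], ol', off + (q + 1), r - 1)
  else (nl ++ [q], ol', off + q, r)

def divide_task_py (ntask : Int) (size : Int) (offset : Int) : List Int × List Int :=
  let q := PySem.Int.floordiv ntask size
  let r := PySem.Int.mod ntask size
  let st := (PySem.List.pyRange 0 size 1).foldl (fun s _ => divideStepA q s) ([], [], offset, r)
  (st.1, st.2.1)

-- ===== PORT B =====
def divide_task_py_alt (ntask : Int) (size : Int) (offset : Int) : List Int × List Int :=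
  let q := PySem.Int.floordiv ntask size
  let r := PySem.Int.mod ntask size
  ((PySem.List.pyRange 0 size 1).map (fun i => if i < r then q + 1 else q),
   (PySem.List.pyRange 0 size 1).map (fun i => offset + i * q + min i r))

-- ===== PRECONDITION & SPEC =====
-- Python raises ZeroDivisionError (from // and %) exactly when size = 0
def Pre_divide_task_py (ntask : Int) (size : Int) (offset : Int) : Prop := size ≠ 0
instance (ntask : Int) (size : Int) (offset : Int) : Decidable (Pre_divide_task_py ntask size offset) := by unfold Pre_divide_task_py; infer_instance
def pvWitness_divide_task_py : Int × Int × Int := (10, 4, 0)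

def Spec_divide_task_py (ntask : Int) (size : Int) (offset : Int) (out : List Int × List Int) : Prop := out = divide_task_py_alt ntask size offset
instance (ntask : Int) (size : Int) (offset : Int) (out : List Int × List Int) : Decidable (Spec_divide_task_py ntask size offset out) := by unfold Spec_divide_task_py; infer_instance

-- ===== CLAIM (what is proved, stated in full; the proofs are below) =====
def Claim_equal_divide_task_py : Prop := ∀ (ntask : Int) (size : Int) (offset : Int), Dom_divide_task_py ntask size offset → Pre_divide_task_py ntask size offset → Spec_divide_task_py ntask size offset (divide_task_py ntask size offset)

-- ===== LEMMAS AND PROOFS =====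

-- closed form of A's loop after n iterations, for any start offset and any r ≥ 0
theorem divideStepA_loop (q off r : Int) (hr : 0 ≤ r) (n : Nat) :
    (PySem.List.pyRange 0 (n : Int) 1).foldl (fun s _ => divideStepA q s) ([], [], off, r) =
      ((PySem.List.pyRange 0 (n : Int) 1).map (fun i => if i < r then q + 1 else q),
       (PySem.List.pyRange 0 (n : Int) 1).map (fun i => off + i * q + min i r),
       off + n * q + min (n : Int) r, max (r - n) 0) := by
  induction n with
  | zero =>
      simp [PySem.List.pyRange_one_eq_nil (by omega : (0:Int) ≤ 0)]
      omega
  | succ n ih =>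
      rw [show ((n + 1 : Nat) : Int) = (n : Int) + 1 by push_cast; ring,
          PySem.List.pyRange_one_succ_right (by positivity : (0:Int) ≤ (n : Int))]
      rw [List.foldl_append, ih]
      simp only [List.foldl_cons, List.foldl_nil, List.map_append, List.map_cons, List.map_nil]
      by_cases hrn : (n : Int) < r
      · have h1 : max (r - n) 0 > 0 := by omega
        have hmin : min ((n : Int)) r = (n : Int) := by omega
        have hmin' : min ((n : Int) + 1) r = (n : Int) + 1 := by omega
        simp only [divideStepA, if_pos h1, if_pos hrn, hmin, hmin', Prod.mk.injEq]
        refine ⟨trivial, trivial, by ring, by omega⟩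
      · have h1 : ¬ (max (r - n) 0 > 0) := by omega
        have hmin : min ((n : Int)) r = r := by omega
        have hmin' : min ((n : Int) + 1) r = r := by omega
        simp only [divideStepA, if_neg h1, if_neg hrn, hmin, hmin', Prod.mk.injEq]
        refine ⟨trivial, trivial, by ring, by omega⟩

-- ===== VERDICT (by name: the statement is the Claim_ definition above) =====
theorem divide_task_py_spec : Claim_equal_divide_task_py := by
  intro ntask size offset _ hpre
  unfold Spec_divide_task_py divide_task_py divide_task_py_alt
  dsimp only
  by_cases hs : 0 < size
  · have hr : 0 ≤ PySem.Int.mod ntask size := PySem.Int.mod_nonneg _ hs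
    have hsz : size = ((size.toNat : Nat) : Int) := by omega
    rw [hsz, divideStepA_loop _ _ _ (by rw [← hsz]; exact hr)]
  · rw [PySem.List.pyRange_one_eq_nil (by omega : size ≤ 0)]
    simp
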